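-- pv_equiv track=rewrite | github.com/Mythologizer/mythologizer_core | mythologizer_core/myth_exchange/utils.py | combine_indices
-- ===== SOURCE A (Python) =====
-- def combine_indices(listener: list[int], speaker: list[int]) -> list[tuple[str, int]]:
--     out, nxt = [], {}
--
--     def find(x):
--         return x if x not in nxt else (nxt.__setitem__(x, find(nxt[x])) or nxt[x])
--
--     def place(i, role):
--         x = find(i)                  # shifted for ordering
--         out.append((role, i, x))     # keep original i, store x for sort
--         nxt[x] = find(x + 1)
--
--     for i in listener: place(i, "listener")
--     for i in speaker:  place(i, "speaker")
--
--     # sort by shifted index, return (role, original)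
--     return [(r, i) for r, i, _ in sorted(out, key=lambda t: t[2])]
-- ===== SOURCE B (Python) =====
-- def combine_indices(listener: list[int], speaker: list[int]) -> list[tuple[str, int]]:
--     tagged = [("listener", i) for i in listener] + [("speaker", i) for i in speaker]
--     used = set()
--     result = []          # kept ordered by assigned slot at all times
--     for role, i in tagged:
--         x = i
--         while x in used:
--             x += 1
--         used.add(x)
--         k = 0
--         while k < len(result) and result[k][0] < x:
--             k += 1
--         result.insert(k, (x, role, i))
--     return [(r, i) for _, r, i in result]
-- ===== Notes on version B (the rewrite author's own statement) =====
-- stated objective: alternative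
-- what changed: Replaces the path-compressed union-find chain (nxt dict with recursive find) and the final library sort by a single pass over one role-tagged list that linearly probes a set of occupied slots and inserts each record at its slot-ordered position, so no sort is needed at the end.
import Mathlib
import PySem

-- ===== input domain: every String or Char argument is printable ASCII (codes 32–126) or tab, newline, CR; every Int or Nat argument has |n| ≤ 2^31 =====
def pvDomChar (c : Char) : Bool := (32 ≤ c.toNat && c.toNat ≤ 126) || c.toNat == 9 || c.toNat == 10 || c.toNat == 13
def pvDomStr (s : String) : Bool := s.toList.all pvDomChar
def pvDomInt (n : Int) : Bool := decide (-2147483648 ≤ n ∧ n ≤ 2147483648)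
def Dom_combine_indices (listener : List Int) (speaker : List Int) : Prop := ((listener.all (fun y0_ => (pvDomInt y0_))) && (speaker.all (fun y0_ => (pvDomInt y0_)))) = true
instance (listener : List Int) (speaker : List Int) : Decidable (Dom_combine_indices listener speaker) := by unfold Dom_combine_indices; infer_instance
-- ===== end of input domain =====

-- B replaces A's union-find next-pointer chain and final library sort by a single pass over one
-- role-tagged list that probes a set of occupied slots and inserts each record at its
-- slot-ordered position (objective: alternative; same results).

-- ===== PORT A =====
-- A's recursive `find` with path compression; the fuel argument is only a totality guard for
-- Lean (Python's recursion terminates because chain values strictly increase; the fuel passed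
-- below is proved sufficient by the lemmas).
def pvFindA (fuel : Nat) (nxt : PySem.Dict Int Int) (x : Int) : Int × PySem.Dict Int Int :=
  match fuel with
  | 0 => (x, nxt)
  | Nat.succ f =>
    match nxt.get? x with
    | none => (x, nxt)
    | some v =>
      let p := pvFindA f nxt v
      (p.1, p.2.insert x p.1)

-- A's `place`: x = find(i); out.append((role, i, x)); nxt[x] = find(x + 1)
def pvPlaceA (fuel : Nat) (st : List (String × Int × Int) × PySem.Dict Int Int)
    (role : String) (i : Int) : List (String × Int × Int) × PySem.Dict Int Int :=
  let p := pvFindA fuel st.2 i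
  let q := pvFindA fuel p.2 (p.1 + 1)
  (st.1 ++ [(role, i, p.1)], q.2.insert p.1 q.1)

def combine_indices (listener : List Int) (speaker : List Int) : List (String × Int) :=
  let fuel := listener.length + speaker.length + 1
  let st1 := listener.foldl (fun st i => pvPlaceA fuel st "listener" i) ([], PySem.Dict.empty)
  let st2 := speaker.foldl (fun st i => pvPlaceA fuel st "speaker" i) st1
  (PySem.List.sorted st2.1 (fun t => t.2.2)).map (fun t => (t.1, t.2.1))

-- ===== PORT B =====
-- B's `while x in used: x += 1`; the fuel (|used| + 1 at each call) is only a totality guard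
-- (the probe hits at most |used| occupied slots).
def pvProbeB (used : PySem.Set Int) : Nat → Int → Int
  | 0, x => x
  | Nat.succ f, x => if used.contains x then pvProbeB used f (x + 1) else x

-- B's `while k < len(result) and result[k][0] < x: k += 1; result.insert(k, …)`:
-- scan past the records with smaller slot, insert in front of the rest (exact on any list).
def pvInsertB (t : Int × String × Int) : List (Int × String × Int) → List (Int × String × Int)
  | [] => [t]
  | u :: rest => if u.1 < t.1 then u :: pvInsertB t rest else t :: u :: rest

-- B's loop body: probe for the slot, mark it used, insert the record in slot order
def pvStepB (st : List (Int × String × Int) × PySem.Set Int) (p : String × Int) :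
    List (Int × String × Int) × PySem.Set Int :=
  let x := pvProbeB st.2 (st.2.length + 1) p.2
  (pvInsertB (x, p.1, p.2) st.1, st.2.add x)

def combine_indices_alt (listener : List Int) (speaker : List Int) : List (String × Int) :=
  let tagged := listener.map (fun i => ("listener", i)) ++ speaker.map (fun i => ("speaker", i))
  let result := (tagged.foldl pvStepB ([], PySem.Set.empty)).1
  result.map (fun t => (t.2.1, t.2.2))

-- ===== PRECONDITION & SPEC =====
def Spec_combine_indices (listener : List Int) (speaker : List Int) (out : List (String × Int)) : Prop := out = combine_indices_alt listener speaker
instance (listener : List Int) (speaker : List Int) (out : List (String × Int)) : Decidable (Spec_combine_indices listener speaker out) := by unfold Spec_combine_indices; infer_instance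

-- ===== CLAIM (what is proved, stated in full; the proofs are below) =====
def Claim_equal_combine_indices : Prop := ∀ (listener : List Int) (speaker : List Int), Dom_combine_indices listener speaker → Spec_combine_indices listener speaker (combine_indices listener speaker)

-- ===== LEMMAS AND PROOFS =====

-- The invariant relating A's next-pointer dict to the set of occupied slots:
-- keys(nxt) = used, and every stored pointer jumps over occupied slots only.
def pvInv (nxt : PySem.Dict Int Int) (used : List Int) : Prop :=
  (∀ k : Int, (nxt.get? k).isSome ↔ k ∈ used) ∧
  (∀ k v : Int, nxt.get? k = some v → k < v ∧ ∀ y : Int, k ≤ y → y < v → y ∈ used)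

-- measure: number of occupied slots ≥ x
def pvM (used : List Int) (x : Int) : Nat := (used.filter (fun y => decide (x ≤ y))).length

-- the set state after B's allocator has processed a tagged list (proof-only helper)
def pvUsedAfter (used : PySem.Set Int) : List (String × Int) → PySem.Set Int
  | [] => used
  | (_, i) :: rest => pvUsedAfter (used.add (pvProbeB used (used.length + 1) i)) rest

-- the records B's pass produces, in processing order (proof-only helper)
def pvAssignB (used : PySem.Set Int) : List (String × Int) → List (Int × String × Int)
  | [] => []
  | (r, i) :: rest =>
    let x := pvProbeB used (used.length + 1) i
    (x, r, i) :: pvAssignB (used.add x) rest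

-- B's single pass = allocate all records first, then fold the ordered insertion
lemma pvFoldStepB : ∀ (ts : List (String × Int)) (acc : List (Int × String × Int))
    (used : PySem.Set Int),
    ts.foldl pvStepB (acc, used)
      = ((pvAssignB used ts).foldl (fun a t => pvInsertB t a) acc, pvUsedAfter used ts) := by
  intro ts
  induction ts with
  | nil => intro acc used; simp [pvAssignB, pvUsedAfter]
  | cons p ts ih =>
    intro acc used
    obtain ⟨r, i⟩ := p
    simp only [List.foldl_cons, pvStepB, pvAssignB, pvUsedAfter]
    exact ih _ _

lemma pvM_le_length (used : List Int) (x : Int) : pvM used x ≤ used.length :=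
  List.length_filter_le _ _

lemma pvFilterMono {x v : Int} (h : x ≤ v) : ∀ (t : List Int),
    (t.filter (fun y => decide (v ≤ y))).length ≤ (t.filter (fun y => decide (x ≤ y))).length := by
  intro t
  induction t with
  | nil => simp
  | cons a t ih =>
    simp only [List.filter_cons]
    by_cases hv : v ≤ a
    · have hx : x ≤ a := le_trans h hv
      simp [hv, hx]
      omega
    · by_cases hx : x ≤ a
      · simp [hv, hx]
        omega
      · simp [hv, hx]
        exact ih

lemma pvM_lt {x v : Int} (hxv : x < v) : ∀ (used : List Int), used.Nodup → x ∈ used →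
    pvM used v < pvM used x := by
  intro used
  induction used with
  | nil => intro _ hx; cases hx
  | cons a t ih =>
    intro hnd hx
    simp only [List.nodup_cons] at hnd
    unfold pvM
    simp only [List.filter_cons]
    rcases List.mem_cons.mp hx with heq | hxt
    · subst heq
      have h1 : ¬ v ≤ x := by omega
      simp [h1]
      have := pvFilterMono (le_of_lt hxv) t
      omega
    · have ht := ih hnd.2 hxt
      unfold pvM at ht
      by_cases hv : v ≤ a
      · have hx2 : x ≤ a := by omega
        simp [hv, hx2]
        omega
      · by_cases hx2 : x ≤ a
        · simp [hv, hx2]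
          omega
        · simp [hv, hx2]
          exact ht

-- the "next free slot ≥ x" characterisation; both allocators produce exactly it
def pvChar (used : List Int) (x r : Int) : Prop :=
  x ≤ r ∧ r ∉ used ∧ ∀ y : Int, x ≤ y → y < r → y ∈ used

lemma pvChar_unique (used : List Int) (x r1 r2 : Int)
    (h1 : pvChar used x r1) (h2 : pvChar used x r2) : r1 = r2 := by
  obtain ⟨hx1, hn1, hall1⟩ := h1
  obtain ⟨hx2, hn2, hall2⟩ := h2
  rcases lt_trichotomy r1 r2 with h | h | h
  · exact absurd (hall2 r1 hx1 h) hn1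
  · exact h
  · exact absurd (hall1 r2 hx2 h) hn2

lemma pvProbeB_spec (used : List Int) (hnd : used.Nodup) :
    ∀ (f : Nat) (x : Int), pvM used x < f → pvChar used x (pvProbeB used f x) := by
  intro f
  induction f with
  | zero => intro x h; omega
  | succ f ih =>
    intro x h
    simp only [pvProbeB]
    by_cases hm : x ∈ used
    · have hc : PySem.Set.contains used x = true := by simp [PySem.Set.contains, hm]
      rw [if_pos hc]
      have hlt : pvM used (x + 1) < f :=
        lt_of_lt_of_le (pvM_lt (by omega) used hnd hm) (Nat.lt_succ_iff.mp h)
      obtain ⟨h1, h2, h3⟩ := ih (x + 1) hlt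
      refine ⟨by omega, h2, fun y hy1 hy2 => ?_⟩
      rcases eq_or_lt_of_le hy1 with rfl | h'
      · exact hm
      · exact h3 y (by omega) hy2
    · rw [if_neg (by simp [PySem.Set.contains, hm])]
      exact ⟨le_refl _, hm, fun y hy1 hy2 => absurd (lt_of_le_of_lt hy1 hy2) (lt_irrefl x)⟩

lemma pvFindA_spec (used : List Int) (hnd : used.Nodup) :
    ∀ (f : Nat) (nxt : PySem.Dict Int Int) (x : Int), pvInv nxt used → pvM used x < f →
      pvChar used x (pvFindA f nxt x).1 ∧ pvInv (pvFindA f nxt x).2 used := by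
  intro f
  induction f with
  | zero => intro nxt x _ h; omega
  | succ f ih =>
    intro nxt x hinv h
    cases hg : nxt.get? x with
    | none =>
      simp only [pvFindA, hg]
      have hxn : x ∉ used := by
        have := hinv.1 x
        rw [hg] at this
        simpa using this
      exact ⟨⟨le_refl _, hxn, fun y h1 h2 => absurd (lt_of_le_of_lt h1 h2) (lt_irrefl x)⟩, hinv⟩
    | some v =>
      simp only [pvFindA, hg]
      have hxs : x ∈ used := (hinv.1 x).mp (by rw [hg]; rfl)
      obtain ⟨hxv, hiv⟩ := hinv.2 x v hg
      have hlt : pvM used v < f :=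
        lt_of_lt_of_le (pvM_lt hxv used hnd hxs) (Nat.lt_succ_iff.mp h)
      obtain ⟨⟨hvle, hvn, hvall⟩, hinv'⟩ := ih nxt v hinv hlt
      constructor
      · refine ⟨by omega, hvn, fun y h1 h2 => ?_⟩
        by_cases h' : y < v
        · exact hiv y h1 h'
        · exact hvall y (by omega) h2
      · constructor
        · intro k
          rw [PySem.Dict.get?_insert]
          split_ifs with hk
          · subst hk
            simpa using hxs
          · exact hinv'.1 k
        · intro k w hkw
          rw [PySem.Dict.get?_insert] at hkw
          split_ifs at hkw with hk
          · cases hkw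
            subst hk
            refine ⟨by omega, fun y h1 h2 => ?_⟩
            by_cases h' : y < v
            · exact hiv y h1 h'
            · exact hvall y (by omega) h2
          · exact hinv'.2 k w hkw

-- one A-step produces exactly the slot B's probe finds, and re-establishes the invariant
lemma pvStepA (fuel : Nat) (role : String) (i : Int) (out : List (String × Int × Int))
    (nxt : PySem.Dict Int Int) (used : PySem.Set Int)
    (hnd : used.Nodup) (hinv : pvInv nxt used) (hf : used.length < fuel) :
    (pvPlaceA fuel (out, nxt) role i).1
      = out ++ [(role, i, pvProbeB used (used.length + 1) i)] ∧
    pvInv (pvPlaceA fuel (out, nxt) role i).2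
      (used ++ [pvProbeB used (used.length + 1) i]) ∧
    pvProbeB used (used.length + 1) i ∉ used := by
  have hM : pvM used i < fuel := lt_of_le_of_lt (pvM_le_length used i) hf
  obtain ⟨hcA, hinv1⟩ := pvFindA_spec used hnd fuel nxt i hinv hM
  have hcB := pvProbeB_spec used hnd (used.length + 1) i
    (lt_of_le_of_lt (pvM_le_length used i) (Nat.lt_succ_self _))
  have hx : (pvFindA fuel nxt i).1 = pvProbeB used (used.length + 1) i :=
    pvChar_unique used i _ _ hcA hcB
  obtain ⟨hile, hxnot, hxall⟩ := hcA
  have hM2 : pvM used ((pvFindA fuel nxt i).1 + 1) < fuel :=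
    lt_of_le_of_lt (pvM_le_length _ _) hf
  obtain ⟨⟨hyle, hynot, hyall⟩, hinv2⟩ :=
    pvFindA_spec used hnd fuel (pvFindA fuel nxt i).2 ((pvFindA fuel nxt i).1 + 1) hinv1 hM2
  simp only [pvPlaceA, ← hx]
  refine ⟨trivial, ⟨?_, ?_⟩, hxnot⟩
  · intro k
    rw [PySem.Dict.get?_insert]
    split_ifs with hk
    · subst hk
      simp
    · rw [hinv2.1 k]
      simp only [List.mem_append, List.mem_singleton]
      constructor
      · exact Or.inl
      · rintro (h | rfl)
        · exact h
        · exact absurd rfl hk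
  · intro k w hkw
    rw [PySem.Dict.get?_insert] at hkw
    split_ifs at hkw with hk
    · cases hkw
      subst hk
      refine ⟨by omega, fun y h1 h2 => ?_⟩
      rcases eq_or_lt_of_le h1 with rfl | h'
      · simp
      · exact List.mem_append_left _ (hyall y (by omega) h2)
    · obtain ⟨hkv, hall⟩ := hinv2.2 k w hkw
      exact ⟨hkv, fun y h1 h2 => List.mem_append_left _ (hall y h1 h2)⟩

-- A's fold over one role-list produces exactly B's allocator records (components reordered)
lemma pvFoldAssign (role : String) (fuel : Nat) : ∀ (l : List Int)
    (out : List (String × Int × Int)) (nxt : PySem.Dict Int Int) (used : PySem.Set Int),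
    used.Nodup → pvInv nxt used → used.length + l.length < fuel →
    (l.foldl (fun st i => pvPlaceA fuel st role i) (out, nxt)).1
      = out ++ (pvAssignB used (l.map (fun i => (role, i)))).map (fun t => (t.2.1, t.2.2, t.1)) ∧
    pvInv (l.foldl (fun st i => pvPlaceA fuel st role i) (out, nxt)).2
      (pvUsedAfter used (l.map (fun i => (role, i)))) ∧
    pvUsedAfter used (l.map (fun i => (role, i)))
      = used ++ (pvAssignB used (l.map (fun i => (role, i)))).map (fun t => t.1) ∧
    (pvUsedAfter used (l.map (fun i => (role, i)))).Nodup ∧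
    (pvUsedAfter used (l.map (fun i => (role, i)))).length = used.length + l.length := by
  intro l
  induction l with
  | nil =>
    intro out nxt used hnd hinv _
    exact ⟨by simp [pvAssignB], hinv, by simp [pvAssignB, pvUsedAfter], hnd, by simp [pvUsedAfter]⟩
  | cons a l ih =>
    intro out nxt used hnd hinv hlen
    simp only [List.length_cons] at hlen
    obtain ⟨h1, h2, h3⟩ := pvStepA fuel role a out nxt used hnd hinv (by omega)
    set x := pvProbeB used (used.length + 1) a with hxdef
    have hadd : used.add x = used ++ [x] := by
      simp [PySem.Set.add, PySem.Set.contains, h3]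
    have hnd' : (used ++ [x]).Nodup := by
      refine List.Nodup.append hnd (by simp) ?_
      intro b hb hc
      simp only [List.mem_singleton] at hc
      subst hc
      exact h3 hb
    obtain ⟨g1, g2, g3, g4, g5⟩ := ih (pvPlaceA fuel (out, nxt) role a).1
      (pvPlaceA fuel (out, nxt) role a).2 (used ++ [x])
      hnd' h2 (by simp; omega)
    have hst : pvPlaceA fuel (out, nxt) role a
        = ((pvPlaceA fuel (out, nxt) role a).1, (pvPlaceA fuel (out, nxt) role a).2) := rfl
    simp only [List.map_cons, List.foldl_cons, pvAssignB, pvUsedAfter, ← hxdef, hadd]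
    rw [hst]
    refine ⟨?_, g2, ?_, g4, by rw [g5]; simp; omega⟩
    · rw [g1, h1]
      simp
    · rw [g3]
      simp

-- B's allocator splits over list append
lemma pvAssignB_append : ∀ (t1 t2 : List (String × Int)) (used : PySem.Set Int),
    pvAssignB used (t1 ++ t2) = pvAssignB used t1 ++ pvAssignB (pvUsedAfter used t1) t2 := by
  intro t1
  induction t1 with
  | nil => intro t2 used; simp [pvAssignB, pvUsedAfter]
  | cons a t1 ih =>
    intro t2 used
    obtain ⟨r, i⟩ := a
    simp only [List.cons_append, pvAssignB, pvUsedAfter]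
    rw [ih]

lemma pvUsedAfter_append : ∀ (t1 t2 : List (String × Int)) (used : PySem.Set Int),
    pvUsedAfter used (t1 ++ t2) = pvUsedAfter (pvUsedAfter used t1) t2 := by
  intro t1
  induction t1 with
  | nil => intro t2 used; simp [pvUsedAfter]
  | cons a t1 ih =>
    intro t2 used
    obtain ⟨r, i⟩ := a
    simp only [List.cons_append, pvUsedAfter]
    rw [ih]

-- insertion produces a permutation of consing
lemma pvInsertB_perm (t : Int × String × Int) : ∀ (ys : List (Int × String × Int)),
    (pvInsertB t ys).Perm (t :: ys) := by
  intro ys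
  induction ys with
  | nil => simp [pvInsertB]
  | cons u rest ih =>
    simp only [pvInsertB]
    split_ifs with h
    · exact ((ih.cons u).trans (List.Perm.swap t u rest))
    · exact List.Perm.refl _

lemma pvInsertB_mem {y t : Int × String × Int} {ys : List (Int × String × Int)}
    (h : y ∈ pvInsertB t ys) : y = t ∨ y ∈ ys :=
  by simpa using (pvInsertB_perm t ys).mem_iff.mp h

-- insertion into a strictly slot-sorted list (new slot distinct from all) stays strictly sorted
lemma pvInsertB_pairwise (t : Int × String × Int) : ∀ (ys : List (Int × String × Int)),
    ys.Pairwise (fun a b => a.1 < b.1) → (∀ u ∈ ys, t.1 ≠ u.1) →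
    (pvInsertB t ys).Pairwise (fun a b => a.1 < b.1) := by
  intro ys
  induction ys with
  | nil => intro _ _; simp [pvInsertB]
  | cons u rest ih =>
    intro hp hne
    simp only [List.pairwise_cons] at hp
    simp only [pvInsertB]
    split_ifs with h
    · refine List.pairwise_cons.mpr ⟨?_, ih hp.2 (fun v hv => hne v (List.mem_cons_of_mem _ hv))⟩
      intro b hb
      rcases pvInsertB_mem hb with rfl | hb'
      · exact h
      · exact hp.1 b hb'
    · have hne0 : t.1 ≠ u.1 := hne u (List.mem_cons_self ..)
      refine List.pairwise_cons.mpr ⟨?_, List.pairwise_cons.mpr hp⟩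
      intro b hb
      rcases List.mem_cons.mp hb with rfl | hb'
      · omega
      · have := hp.1 b hb'
        omega

-- folding the insertion over records with distinct slots: a slot-sorted permutation
lemma pvFoldInsert : ∀ (S acc : List (Int × String × Int)),
    acc.Pairwise (fun a b => a.1 < b.1) →
    (acc.map (fun t => t.1) ++ S.map (fun t => t.1)).Nodup →
    (S.foldl (fun a t => pvInsertB t a) acc).Perm (acc ++ S) ∧
    (S.foldl (fun a t => pvInsertB t a) acc).Pairwise (fun a b => a.1 < b.1) := by
  intro S
  induction S with
  | nil =>
    intro acc hp _
    exact ⟨by simp, hp⟩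
  | cons t S ih =>
    intro acc hp hnd
    simp only [List.foldl_cons]
    have hne : ∀ u ∈ acc, t.1 ≠ u.1 := by
      intro u hu heq
      have h1 : u.1 ∈ acc.map (fun t => t.1) := List.mem_map_of_mem hu
      have h2 : t.1 ∈ (t :: S).map (fun t => t.1) := by simp
      rw [heq] at h2
      exact (List.disjoint_of_nodup_append hnd) h1 h2
    have hp' := pvInsertB_pairwise t acc hp hne
    have hpermkeys : ((pvInsertB t acc).map (fun t => t.1) ++ S.map (fun t => t.1)).Perm
        (acc.map (fun t => t.1) ++ (t :: S).map (fun t => t.1)) := by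
      have P1 : ((pvInsertB t acc).map (fun t => t.1) ++ S.map (fun t => t.1)).Perm
          ((t :: acc).map (fun t => t.1) ++ S.map (fun t => t.1)) :=
        List.Perm.append_right _ ((pvInsertB_perm t acc).map _)
      have P2 : ((t :: acc).map (fun t => t.1) ++ S.map (fun t => t.1)).Perm
          (acc.map (fun t => t.1) ++ (t :: S).map (fun t => t.1)) := by
        simpa using (List.perm_middle
          (a := t.1) (l₁ := acc.map (fun t => t.1)) (l₂ := S.map (fun t => t.1))).symm
      exact P1.trans P2
    have hnd' : ((pvInsertB t acc).map (fun t => t.1) ++ S.map (fun t => t.1)).Nodup :=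
      (List.Perm.nodup_iff hpermkeys).mpr hnd
    obtain ⟨p1, p2⟩ := ih (pvInsertB t acc) hp' hnd'
    refine ⟨?_, p2⟩
    have q1 : (pvInsertB t acc ++ S).Perm ((t :: acc) ++ S) :=
      List.Perm.append_right _ (pvInsertB_perm t acc)
    have q2 : ((t :: acc) ++ S).Perm (acc ++ t :: S) := by
      simpa using (List.perm_middle (a := t) (l₁ := acc) (l₂ := S)).symm
    exact p1.trans (q1.trans q2)

-- ===== VERDICT (by name: the statement is the Claim_ definition above) =====
theorem combine_indices_spec : Claim_equal_combine_indices := by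
  intro listener speaker _
  unfold Spec_combine_indices
  simp only [combine_indices, combine_indices_alt, pvFoldStepB]
  have hinv0 : pvInv PySem.Dict.empty [] := by
    constructor
    · intro k
      simp [PySem.Dict.get?_empty]
    · intro k v h
      simp [PySem.Dict.get?_empty] at h
  set F := listener.length + speaker.length + 1 with hF
  obtain ⟨a1, a2, a3, a4, a5⟩ := pvFoldAssign "listener" F listener [] PySem.Dict.empty
    PySem.Set.empty (by simp [PySem.Set.empty]) hinv0 (by simp [PySem.Set.empty]; omega)
  set stA := listener.foldl (fun st i => pvPlaceA F st "listener" i) ([], PySem.Dict.empty)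
    with hstA
  obtain ⟨b1, b2, b3, b4, b5⟩ := pvFoldAssign "speaker" F speaker stA.1 stA.2
    (pvUsedAfter PySem.Set.empty (listener.map (fun i => (("listener" : String), i)))) a4 a2
    (by rw [a5]; simp [PySem.Set.empty]; omega)
  -- A's collected records are B's allocator records with components reordered
  have hS : (speaker.foldl (fun st i => pvPlaceA F st "speaker" i) stA).1
      = (pvAssignB PySem.Set.empty
          (listener.map (fun i => (("listener" : String), i))
            ++ speaker.map (fun i => (("speaker" : String), i)))).map
          (fun t => (t.2.1, t.2.2, t.1)) := by
    have e : stA = (stA.1, stA.2) := rfl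
    rw [e, b1, a1, pvAssignB_append]
    simp
  rw [hS]
  -- distinct slots
  have hndkeys : ((pvAssignB PySem.Set.empty
      (listener.map (fun i => (("listener" : String), i))
        ++ speaker.map (fun i => (("speaker" : String), i)))).map (fun t => t.1)).Nodup := by
    have h1 : pvUsedAfter PySem.Set.empty
        (listener.map (fun i => (("listener" : String), i))
          ++ speaker.map (fun i => (("speaker" : String), i)))
        = (pvAssignB PySem.Set.empty
            (listener.map (fun i => (("listener" : String), i))
              ++ speaker.map (fun i => (("speaker" : String), i)))).map (fun t => t.1) := by
      rw [pvUsedAfter_append, pvAssignB_append, b3, a3]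
      simp [PySem.Set.empty]
    have h2 : (pvUsedAfter PySem.Set.empty
        (listener.map (fun i => (("listener" : String), i))
          ++ speaker.map (fun i => (("speaker" : String), i)))).Nodup := by
      rw [pvUsedAfter_append]; exact b4
    rw [← h1]; exact h2
  set S := pvAssignB PySem.Set.empty
    (listener.map (fun i => (("listener" : String), i))
      ++ speaker.map (fun i => (("speaker" : String), i))) with hSdef
  obtain ⟨hperm, hpair⟩ := pvFoldInsert S [] (by simp) (by simpa using hndkeys)
  set I := S.foldl (fun a t => pvInsertB t a) [] with hI
  have hsorted : PySem.List.sorted (S.map (fun t => (t.2.1, t.2.2, t.1))) (fun t => t.2.2) false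
      = I.map (fun t => (t.2.1, t.2.2, t.1)) := by
    apply PySem.List.sorted_eq_of_perm_of_pairwise_lt
    · exact (hperm.trans (by simp)).map _
    · exact List.Pairwise.map _ (fun a b h => h) hpair
  rw [hsorted, List.map_map]
  simp
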